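-- pv_equiv track=rewrite | github.com/Aoof/codeforces | Produits/PermChain/pChain.py | solveFor
-- ===== SOURCE A (Python) =====
-- def findF(perm):
--     f = 0
--     for i, elem in enumerate(perm):
--         if (i+1 == elem):
--             f += 1
--     return f
--
-- def solveFor(x):
--     a = [i + 1 for i in range(x)]
--     iterations = []
--     f = x
--
--     iterations.append(" ".join([str(i) for i in a.copy()]))
--     for i, _ in enumerate(a):
--         a[0], a[i] = a[i], a[0]
--         _f = findF(a)
--         if (_f < f):
--             f = _f
--             iterations.append(" ".join([str(i) for i in a.copy()]))
--
--     return "\n".join(iterations)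
-- ===== SOURCE B (Python) =====
-- def solveFor(x):
--     # Closed form: after iteration i>=1 of A's loop the array is
--     # [i+1, 1, 2, ..., i, i+2, ..., x] and its fixed-point count strictly
--     # drops, so every state with leading element k = 2..x is recorded.
--     lines = [" ".join(str(i) for i in range(1, x + 1))]
--     for k in range(2, x + 1):
--         perm = [k] + list(range(1, k)) + list(range(k + 1, x + 1))
--         lines.append(" ".join(map(str, perm)))
--     return "\n".join(lines)
-- ===== Notes on version B (the rewrite author's own statement) =====
-- stated objective: alternative
-- what changed: B emits each recorded state directly by a closed-form description (k followed by 1..k-1 and k+1..x), eliminating A's in-place swapping, the findF fixed-point rescans and the strict-decrease test entirely.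
import Mathlib
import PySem

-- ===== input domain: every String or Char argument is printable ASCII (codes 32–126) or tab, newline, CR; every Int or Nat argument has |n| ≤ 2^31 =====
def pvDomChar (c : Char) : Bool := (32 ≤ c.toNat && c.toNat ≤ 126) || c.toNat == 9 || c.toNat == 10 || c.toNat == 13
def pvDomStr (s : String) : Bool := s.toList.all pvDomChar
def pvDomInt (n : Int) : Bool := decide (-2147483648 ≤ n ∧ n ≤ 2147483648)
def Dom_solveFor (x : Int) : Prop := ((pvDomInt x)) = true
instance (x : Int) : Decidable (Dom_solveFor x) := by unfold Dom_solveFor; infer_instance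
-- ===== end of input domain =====

-- B replaces A's swap-and-rescan loop by a closed-form emission of each recorded state (objective: alternative, same asymptotic cost).

-- ===== PORT A =====
-- " ".join([str(i) for i in l]) — shared by both Pythons verbatim
def pvJoinInts (l : List Int) : String := PySem.Str.join " " (l.map PySem.Int.toStr)

-- findF(perm): count positions with i+1 == elem
def findF (perm : List Int) : Int :=
  (PySem.List.enumerate perm).foldl (fun f p => if p.1 + 1 == p.2 then f + 1 else f) 0

-- a[0], a[i] = a[i], a[0]  (exact: the loop only calls this with i < a.length, so getD defaults are never used)
def swapA (a : List Int) (i : Nat) : List Int :=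
  let v0 := a.getD 0 0
  let vi := a.getD i 0
  (a.set 0 vi).set i v0

-- one iteration of A's 'for i, _ in enumerate(a)' body; state = (a, f, iterations)
def stepA (st : List Int × Int × List String) (i : Nat) : List Int × Int × List String :=
  let a := swapA st.1 i
  let f2 := findF a
  if f2 < st.2.1 then (a, f2, st.2.2 ++ [pvJoinInts a]) else (a, st.2.1, st.2.2)

def solveFor (x : Int) : String :=
  let a := (PySem.List.pyRange 0 x 1).map (· + 1)
  -- 'for i, _ in enumerate(a)': the element is ignored, so the loop is over indices 0..len(a)-1 (a's length never changes)
  let r := (List.range a.length).foldl stepA (a, x, [pvJoinInts a])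
  PySem.Str.join "\n" r.2.2

-- ===== PORT B =====
def solveFor_alt (x : Int) : String :=
  let first := pvJoinInts (PySem.List.pyRange 1 (x + 1) 1)
  let rest := (PySem.List.pyRange 2 (x + 1) 1).map (fun k =>
    pvJoinInts (k :: (PySem.List.pyRange 1 k 1 ++ PySem.List.pyRange (k + 1) (x + 1) 1)))
  PySem.Str.join "\n" (first :: rest)

-- ===== PRECONDITION & SPEC =====
def Spec_solveFor (x : Int) (out : String) : Prop := out = solveFor_alt x
instance (x : Int) (out : String) : Decidable (Spec_solveFor x out) := by unfold Spec_solveFor; infer_instance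

-- ===== CLAIM (what is proved, stated in full; the proofs are below) =====
def Claim_equal_solveFor : Prop := ∀ (x : Int), Dom_solveFor x → Spec_solveFor x (solveFor x)

-- ===== LEMMAS AND PROOFS =====

-- the state A's array holds after its loop has processed indices 0..k-1 (k ≥ 1): [k, 1, .., k-1, k+1, .., x]
def permI (x k : Int) : List Int := k :: (PySem.List.pyRange 1 k 1 ++ PySem.List.pyRange (k + 1) (x + 1) 1)

theorem pyRange_eq_permI_one (x : Int) (hx : 1 ≤ x) :
    PySem.List.pyRange 1 (x + 1) 1 = permI x 1 := by
  unfold permI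
  rw [PySem.List.pyRange_one_cons (by omega), show PySem.List.pyRange 1 1 1 = [] from PySem.List.pyRange_one_eq_nil (by omega)]
  simp

theorem identity_eq_permI (x : Int) (hx : 1 ≤ x) :
    (PySem.List.pyRange 0 x 1).map (· + 1) = permI x 1 := by
  rw [← pyRange_eq_permI_one x hx, PySem.List.pyRange_one, PySem.List.pyRange_one]
  have h : (x - 0).toNat = (x + 1 - 1).toNat := by omega
  rw [h, List.map_map]
  exact List.map_congr_left (fun k _ => by simp; ring)

theorem enumerate_range_map (g : Nat → Int) (m : Nat) (s : Int) :
    PySem.List.enumerate ((List.range m).map g) s = (List.range m).map (fun (j : Nat) => ((s + (j : Int) : Int), g j)) := by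
  induction m with
  | zero => simp [PySem.List.enumerate_nil]
  | succ m ih =>
      rw [List.range_succ, List.map_append, List.map_append, PySem.List.enumerate_append, ih]
      simp [PySem.List.enumerate_cons, PySem.List.enumerate_nil]

theorem countP_enum_zero (m : Nat) (s a : Int) (h : s = a) :
    ((List.range m).map (fun j : Nat => ((s + (j : Int) : Int), a + (j : Int)))).countP
      (fun p => p.1 + 1 == p.2) = 0 := by
  rw [List.countP_eq_zero]
  intro p hp
  simp only [List.mem_map] at hp
  obtain ⟨j, _, rfl⟩ := hp
  simp only [beq_iff_eq]
  omega

theorem countP_enum_all (m : Nat) (s a : Int) (h : s + 1 = a) :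
    ((List.range m).map (fun j : Nat => ((s + (j : Int) : Int), a + (j : Int)))).countP
      (fun p => p.1 + 1 == p.2) = m := by
  have hall : ∀ p ∈ (List.range m).map (fun j : Nat => ((s + (j : Int) : Int), a + (j : Int))),
      (fun p : Int × Int => p.1 + 1 == p.2) p = true := by
    intro p hp
    simp only [List.mem_map] at hp
    obtain ⟨j, _, rfl⟩ := hp
    simp only [beq_iff_eq]
    omega
  simpa using List.countP_eq_length.mpr hall

theorem findF_permI (x k : Int) (h1 : 1 ≤ k) (h2 : k ≤ x) :
    findF (permI x k) = (x - k) + (if k = 1 then 1 else 0) := by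
  unfold findF permI
  rw [PySem.List.foldl_if_add_one, PySem.List.enumerate_cons, PySem.List.enumerate_append,
    PySem.List.pyRange_one (a := 1), PySem.List.pyRange_one (a := k + 1),
    enumerate_range_map, enumerate_range_map]
  rw [List.countP_cons, List.countP_append]
  rw [countP_enum_zero _ _ _ (by norm_num),
    countP_enum_all _ _ _ (by simp only [List.length_map, List.length_range]; omega)]
  by_cases hk : k = 1
  · subst hk
    simp
    omega
  · have hb : ((0 : Int) + 1 == k) = false := by simp only [beq_eq_false_iff_ne]; omega
    simp only [hb]
    simp [hk]
    omega

theorem swapA_zero (a : List Int) : swapA a 0 = a := by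
  cases a with
  | nil => rfl
  | cons h t => simp [swapA]

theorem swapA_permI (x : Int) (i : Nat) (h1 : 1 ≤ i) (h2 : (i : Int) + 1 ≤ x) :
    swapA (permI x i) i = permI x ((i : Int) + 1) := by
  obtain ⟨j, rfl⟩ : ∃ j, i = j + 1 := ⟨i - 1, by omega⟩
  have hlen : (PySem.List.pyRange 1 ((j + 1 : Nat) : Int) 1).length = j := by
    rw [PySem.List.length_pyRange_one]; push_cast; omega
  have hs2 : PySem.List.pyRange (((j + 1 : Nat) : Int) + 1) (x + 1) 1
      = (((j + 1 : Nat) : Int) + 1) :: PySem.List.pyRange (((j + 1 : Nat) : Int) + 1 + 1) (x + 1) 1 :=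
    PySem.List.pyRange_one_cons (by omega)
  unfold swapA permI
  rw [hs2]
  simp only [List.getD_eq_getElem?_getD, List.getElem?_cons_succ,
    List.set_cons_zero, List.set_cons_succ]
  rw [List.getElem?_append_right (by omega), hlen]
  simp only [Nat.sub_self, List.getElem?_cons_zero, Option.getD_some]
  rw [List.set_append_right _ _ (by omega), hlen]
  simp only [Nat.sub_self, List.set_cons_zero]
  rw [show ((j + 1 : Nat) : Int) + 1 = (((j + 1 : Nat) : Int) + 1) from rfl]
  have hsucc : PySem.List.pyRange 1 (((j + 1 : Nat) : Int) + 1) 1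
      = PySem.List.pyRange 1 ((j + 1 : Nat) : Int) 1 ++ [((j + 1 : Nat) : Int)] :=
    PySem.List.pyRange_one_succ_right (by omega)
  rw [hsucc]
  simp

def fVal (x : Int) (m : Nat) : Int := if m = 1 then x else x - m
def linesUpTo (x : Int) (m : Nat) : List String := (List.range m).map (fun (j : Nat) => pvJoinInts (permI x ((j : Int) + 1)))

theorem loop_invariant (x : Int) (_hx : 1 ≤ x) (m : Nat) (h1 : 1 ≤ m) (h2 : (m : Int) ≤ x) :
    (List.range m).foldl stepA (permI x 1, x, [pvJoinInts (permI x 1)])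
      = (permI x m, fVal x m, linesUpTo x m) := by
  induction m, h1 using Nat.le_induction with
  | base =>
      rw [List.range_one, List.foldl_cons, List.foldl_nil]
      simp only [stepA, swapA_zero]
      have hf : findF (permI x 1) = x := by
        rw [findF_permI x 1 (by omega) (by omega)]; simp
      rw [hf]
      simp only [lt_self_iff_false, if_false]
      unfold fVal linesUpTo
      simp
  | succ m hm ih =>
      have hmx : (m : Int) ≤ x := by push_cast at h2 ⊢; omega
      rw [List.range_succ, List.foldl_append, ih hmx, List.foldl_cons, List.foldl_nil]
      simp only [stepA]
      have hswap : swapA (permI x (m : Int)) m = permI x ((m : Int) + 1) :=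
        swapA_permI x m hm (by omega)
      have hf : findF (permI x ((m : Int) + 1)) = x - ((m : Int) + 1) := by
        rw [findF_permI x ((m : Int) + 1) (by omega) (by push_cast at h2; omega)]
        have : ¬ ((m : Int) + 1 = 1) := by omega
        simp [this]
      simp only [hswap, hf]
      have hlt : x - ((m : Int) + 1) < fVal x m := by
        unfold fVal; split <;> omega
      rw [if_pos hlt]
      have hfv : fVal x (m + 1) = x - ((m : Int) + 1) := by
        unfold fVal
        rw [if_neg (by omega)]
        push_cast; ring
      have hlines : linesUpTo x (m + 1) = linesUpTo x m ++ [pvJoinInts (permI x ((m : Int) + 1))] := by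
        unfold linesUpTo
        rw [List.range_succ, List.map_append]
        simp
      rw [hfv, hlines]
      push_cast
      simp

theorem alt_eq_lines (x : Int) (hx : 1 ≤ x) :
    solveFor_alt x = PySem.Str.join "\n" (linesUpTo x x.toNat) := by
  have hn : x.toNat = (x.toNat - 1) + 1 := by omega
  simp only [solveFor_alt]
  rw [pyRange_eq_permI_one x hx, PySem.List.pyRange_one (a := 2)]
  unfold linesUpTo
  rw [hn, List.range_succ_eq_map, List.map_cons, List.map_map, List.map_map]
  congr 1
  rw [show (x + 1 - 2).toNat = x.toNat - 1 from by omega]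
  refine List.cons_eq_cons.mpr ⟨by norm_num, ?_⟩
  apply List.map_congr_left
  intro j hj
  show pvJoinInts (permI x (2 + (j : Int))) = pvJoinInts (permI x (((j + 1 : Nat) : Int) + 1))
  have harg : (2 : Int) + (j : Int) = ((j + 1 : Nat) : Int) + 1 := by push_cast; ring
  rw [harg]

-- ===== VERDICT (by name: the statement is the Claim_ definition above) =====
theorem solveFor_spec : Claim_equal_solveFor := by
  intro x _
  unfold Spec_solveFor
  by_cases hx : 1 ≤ x
  · simp only [solveFor]
    rw [identity_eq_permI x hx]
    have hlen : (permI x 1).length = x.toNat := by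
      simp [permI, PySem.List.length_pyRange_one]
      omega
    rw [hlen, loop_invariant x hx x.toNat (by omega) (by omega), alt_eq_lines x hx]
  · have h0 : PySem.List.pyRange 0 x 1 = [] := PySem.List.pyRange_one_eq_nil (by omega)
    have h1 : PySem.List.pyRange 1 (x + 1) 1 = [] := PySem.List.pyRange_one_eq_nil (by omega)
    have h2 : PySem.List.pyRange 2 (x + 1) 1 = [] := PySem.List.pyRange_one_eq_nil (by omega)
    simp [solveFor, solveFor_alt, h0, h1, h2]
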